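-- pv_equiv track=rewrite | github.com/Fateen981/P.R.I.M | Classes_Functions.py | stretchy_list_append
-- ===== SOURCE A (Python) =====
-- def stretchy_list_append(elem, ind, lis, padding = []):
--     '''should return an edited list, append means adding elements to a list
--     lis = stretchy_list_add(elem, ind, lis)'''
--     ind = int(ind)
--     try:
--         lis[ind].append(elem)
--         return lis
--     except IndexError as e:
--         err_str = 'list index out of range'
--         if str(e) == err_str:
--             length = len(lis)
--             if ind < 0:
--                 # extra_length = ind - length
--                 raise NotImplementedError('Do you want to pre- or a-ppend')
--             else:
--                 extra_length = ind - length + 1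
--             pad_list = list()
--             for _ in range(extra_length):
--                 pad_list += [padding]
--             pad_list[-1] = [elem]
--             lis.extend(pad_list)
--             return lis
--         else:
--             raise OSError("Index Error not caught")
-- ===== SOURCE B (Python) =====
-- def stretchy_list_append(elem, ind, lis, padding = []):
--     '''Single-pass rebuild: normalize the index, then walk forward one slot at a
--     time, emitting the existing row (or padding once the source runs out) until
--     the index is consumed; there, append elem to the row the walk landed on (or
--     place [elem]) and copy the tail. The rebuilt list is slice-assigned back, so
--     lis is still mutated in place; note A also mutates the targeted inner row
--     itself, which this rebuild does not.'''
--     ind = int(ind)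
--     if ind < 0:
--         if ind < -len(lis):
--             raise NotImplementedError('Do you want to pre- or a-ppend')
--         ind += len(lis)
--     src = list(lis)
--     out = []
--     i = 0
--     k = ind
--     while k > 0:
--         out.append(src[i] if i < len(src) else padding)
--         i += 1
--         k -= 1
--     out.append(src[i] + [elem] if i < len(src) else [elem])
--     out.extend(src[i + 1:])
--     lis[:] = out
--     return lis
-- ===== Notes on version B (the rewrite author's own statement) =====
-- stated objective: alternative
-- what changed: A does an in-place indexed mutation with try/except and an arithmetically-sized padding block appended via extend; B instead normalizes the index once and rebuilds the whole list by a single structural recursion that consumes the index, emitting existing rows or padding until it places [elem] (or appends elem to the row it lands on), then slice-assigns the result back.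
import Mathlib
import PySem

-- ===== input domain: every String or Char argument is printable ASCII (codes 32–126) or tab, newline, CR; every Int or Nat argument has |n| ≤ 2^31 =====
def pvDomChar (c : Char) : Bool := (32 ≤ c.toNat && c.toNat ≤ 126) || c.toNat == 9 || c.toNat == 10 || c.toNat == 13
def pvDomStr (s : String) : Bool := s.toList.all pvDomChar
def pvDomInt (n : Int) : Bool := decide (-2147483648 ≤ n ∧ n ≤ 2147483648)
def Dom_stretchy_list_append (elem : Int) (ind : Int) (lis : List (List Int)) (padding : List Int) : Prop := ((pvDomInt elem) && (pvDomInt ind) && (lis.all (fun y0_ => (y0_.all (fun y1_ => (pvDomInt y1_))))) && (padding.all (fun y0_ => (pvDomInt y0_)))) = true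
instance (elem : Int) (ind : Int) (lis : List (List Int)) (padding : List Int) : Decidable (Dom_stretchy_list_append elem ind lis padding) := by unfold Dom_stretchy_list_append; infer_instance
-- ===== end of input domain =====

-- B replaces A's try/except in-place mutation + arithmetic padding-block extend by one
-- structural recursion that rebuilds the list while consuming the normalized index
-- (objective: alternative). Both Pythons mutate lis in place; A also mutates the targeted
-- inner list, B rebuilds it — the equivalence proved here is about the return value.

-- ===== PORT A =====
def stretchy_list_append (elem : Int) (ind : Int) (lis : List (List Int)) (padding : List Int) : List (List Int) :=
  -- try: lis[ind].append(elem); IndexError iff the index is out of range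
  if PySem.Raise.InRange lis.length ind then
    let i := (if ind < 0 then ind + lis.length else ind).toNat
    lis.set i (lis.getD i [] ++ [elem])
  else if ind < 0 then
    lis  -- A raises NotImplementedError here; excluded by Pre_
  else
    let extra_length := (ind - (lis.length : Int) + 1).toNat
    let pad_list := (List.range extra_length).foldl (fun acc _ => acc ++ [padding]) []
    let pad_list := pad_list.set (pad_list.length - 1) [elem]  -- pad_list[-1] = [elem]
    lis ++ pad_list

-- ===== PORT B =====
-- Source B's while loop: k counts down, i counts up, `out` accumulates emitted slots
def pvLoopB (elem : Int) (padding : List Int) (src : List (List Int)) :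
    Nat → Nat → List (List Int) → List (List Int)
  | 0, i, out =>
      -- out.append(src[i] + [elem] if i < len(src) else [elem]); out.extend(src[i+1:])
      (out ++ [if i < src.length then src.getD i [] ++ [elem] else [elem]]) ++ src.drop (i + 1)
  | k + 1, i, out =>
      -- out.append(src[i] if i < len(src) else padding)
      pvLoopB elem padding src k (i + 1) (out ++ [if i < src.length then src.getD i [] else padding])

def stretchy_list_append_alt (elem : Int) (ind : Int) (lis : List (List Int)) (padding : List Int) : List (List Int) :=
  if ind < 0 then
    if ind < -(lis.length : Int) then
      lis  -- B raises NotImplementedError here; excluded by Pre_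
    else
      pvLoopB elem padding lis (ind + lis.length).toNat 0 []
  else
    pvLoopB elem padding lis ind.toNat 0 []

-- ===== PRECONDITION & SPEC =====
-- Pre_ excludes exactly the inputs where A (and B) raise NotImplementedError: ind < -len(lis).
def Pre_stretchy_list_append (elem : Int) (ind : Int) (lis : List (List Int)) (padding : List Int) : Prop :=
  -(lis.length : Int) ≤ ind
instance (elem : Int) (ind : Int) (lis : List (List Int)) (padding : List Int) : Decidable (Pre_stretchy_list_append elem ind lis padding) := by unfold Pre_stretchy_list_append; infer_instance
def pvWitness_stretchy_list_append : Int × Int × List (List Int) × List Int := (5, 3, [[1]], [9])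
def Spec_stretchy_list_append (elem : Int) (ind : Int) (lis : List (List Int)) (padding : List Int) (out : List (List Int)) : Prop := out = stretchy_list_append_alt elem ind lis padding
instance (elem : Int) (ind : Int) (lis : List (List Int)) (padding : List Int) (out : List (List Int)) : Decidable (Spec_stretchy_list_append elem ind lis padding out) := by unfold Spec_stretchy_list_append; infer_instance

-- ===== CLAIM (what is proved, stated in full; the proofs are below) =====
def Claim_equal_stretchy_list_append : Prop := ∀ (elem : Int) (ind : Int) (lis : List (List Int)) (padding : List Int), Dom_stretchy_list_append elem ind lis padding → Pre_stretchy_list_append elem ind lis padding → Spec_stretchy_list_append elem ind lis padding (stretchy_list_append elem ind lis padding)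

-- ===== LEMMAS AND PROOFS =====

-- A's accumulation loop builds a replicate list.
theorem foldl_append_padding (p : List Int) (k : Nat) :
    (List.range k).foldl (fun acc _ => acc ++ [p]) [] = List.replicate k p := by
  induction k with
  | zero => rfl
  | succ n ih => simp [List.range_succ, ih, List.replicate_succ']

theorem set_last_replicate (p e : List Int) (k : Nat) (hk : 0 < k) :
    (List.replicate k p).set (k - 1) e = List.replicate (k - 1) p ++ [e] := by
  obtain ⟨m, rfl⟩ := Nat.exists_eq_succ_of_ne_zero (Nat.pos_iff_ne_zero.mp hk)
  simp [List.replicate_succ']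

-- Closed form of B's loop.
theorem pvLoopB_spec (elem : Int) (padding : List Int) (src : List (List Int)) (k : Nat) :
    ∀ (i : Nat) (out : List (List Int)),
      pvLoopB elem padding src k i out =
        out ++ (List.range k).map (fun j => src.getD (i + j) padding)
            ++ [if i + k < src.length then src.getD (i + k) [] ++ [elem] else [elem]]
            ++ src.drop (i + k + 1) := by
  induction k with
  | zero => intro i out; simp [pvLoopB]
  | succ n ih =>
    intro i out
    have hmap : (List.range (n + 1)).map (fun j => src.getD (i + j) padding)
        = src.getD i padding :: (List.range n).map (fun j => src.getD (i + 1 + j) padding) := by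
      rw [List.range_succ_eq_map, List.map_cons, List.map_map]
      simp only [Nat.add_zero]
      congr 1
      apply List.map_congr_left
      intro j _
      have hj : i + (j + 1) = i + 1 + j := by omega
      simp [Function.comp, hj]
    have hgetD : src.getD i padding = if i < src.length then src.getD i [] else padding := by
      by_cases h : i < src.length
      · simp [List.getD, h, List.getElem?_eq_getElem h]
      · simp [List.getD, h, List.getElem?_eq_none (by omega : src.length ≤ i)]
    rw [pvLoopB, ih (i + 1), hmap, hgetD]
    have h1 : i + 1 + n = i + (n + 1) := by omega
    simp [h1, List.append_assoc]

theorem map_range_getD_lt (padding : List Int) (src : List (List Int)) (k : Nat)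
    (h : k ≤ src.length) :
    (List.range k).map (fun j => src.getD j padding) = src.take k := by
  induction k with
  | zero => simp
  | succ n ih =>
    have hn : n < src.length := by omega
    rw [List.range_succ, List.map_append, ih (by omega), List.take_succ]
    simp [List.getD, List.getElem?_eq_getElem hn]

theorem map_range_getD_ge (padding : List Int) (src : List (List Int)) (k : Nat)
    (h : src.length ≤ k) :
    (List.range k).map (fun j => src.getD j padding)
      = src ++ List.replicate (k - src.length) padding := by
  induction k with
  | zero =>
    have : src = [] := List.eq_nil_of_length_eq_zero (by omega)
    simp [this]
  | succ n ih =>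
    by_cases hn : src.length ≤ n
    · rw [List.range_succ, List.map_append, ih hn]
      have hp : src[n]?.getD padding = padding := by
        simp [List.getElem?_eq_none hn]
      have hr : n + 1 - src.length = (n - src.length) + 1 := by omega
      simp [hp, hr, List.replicate_succ', List.append_assoc]
    · have hlen : src.length = n + 1 := by omega
      rw [← hlen, map_range_getD_lt padding src src.length le_rfl]
      simp

-- ===== VERDICT (by name: the statement is the Claim_ definition above) =====
theorem stretchy_list_append_spec : Claim_equal_stretchy_list_append := by
  intro elem ind lis padding _ hpre
  unfold Spec_stretchy_list_append stretchy_list_append stretchy_list_append_alt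
  unfold Pre_stretchy_list_append at hpre
  by_cases hin : PySem.Raise.InRange lis.length ind
  · have h' : -(lis.length : Int) ≤ ind ∧ ind < lis.length := by
      simpa [PySem.Raise.InRange] using hin
    have key : ∀ (i : Nat), i < lis.length →
        pvLoopB elem padding lis i 0 [] = lis.set i (lis.getD i [] ++ [elem]) := by
      intro i hi
      rw [pvLoopB_spec]
      simp only [Nat.zero_add, List.nil_append]
      rw [map_range_getD_lt padding lis i (by omega)]
      rw [List.set_eq_take_cons_drop _ hi]
      simp [hi]
    by_cases hneg : ind < 0
    · have hlt : (ind + lis.length).toNat < lis.length := by omega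
      simp [hin, hneg, h', key _ hlt]
    · have hlt : ind.toNat < lis.length := by omega
      simp [hin, hneg, h', key _ hlt]
  · have h' : ¬(-(lis.length : Int) ≤ ind ∧ ind < lis.length) := by
      simpa [PySem.Raise.InRange] using hin
    have hge : (lis.length : Int) ≤ ind := by omega
    have hneg : ¬ ind < 0 := by omega
    have hgeN : lis.length ≤ ind.toNat := by omega
    simp only [hin, if_false, hneg]
    rw [pvLoopB_spec]
    simp only [Nat.zero_add, List.nil_append]
    rw [map_range_getD_ge padding lis _ hgeN]
    have hc : ¬ ind.toNat < lis.length := by omega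
    have hd : lis.drop (ind.toNat + 1) = [] := List.drop_eq_nil_of_le (by omega)
    rw [if_neg hc, hd]
    have hk : 0 < (ind - (lis.length : Int) + 1).toNat := by omega
    rw [foldl_append_padding, List.length_replicate, set_last_replicate _ _ _ hk]
    have h2 : (ind - (lis.length : Int) + 1).toNat - 1 = ind.toNat - lis.length := by omega
    rw [h2]
    simp [List.append_assoc]
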